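-- pv_equiv track=rewrite | github.com/soyukke/lean-unsolved | scripts/collatz_stern_brocot_syracuse.py | syracuse_orbit
-- ===== SOURCE A (Python) =====
-- def v2(n):
--     """2-adic valuation"""
--     if n == 0:
--         return 999
--     count = 0
--     while n % 2 == 0:
--         n //= 2
--         count += 1
--     return count
--
-- def syracuse(n):
--     """Syracuse T(n) for odd n"""
--     assert n % 2 == 1 and n > 0
--     val = 3 * n + 1
--     return val >> v2(val)
--
-- def syracuse_orbit(n, max_steps=1000):
--     """奇数のみのSyracuse軌道"""
--     orbit = [n]
--     current = n
--     for _ in range(max_steps):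
--         if current == 1 and len(orbit) > 1:
--             break
--         current = syracuse(current)
--         orbit.append(current)
--         if current == 1:
--             break
--     return orbit
-- ===== SOURCE B (Python) =====
-- def syracuse_orbit(n, max_steps=1000):
--     """Odd-only Syracuse orbit, built recursively; the power-of-two factor of
--     3m+1 is stripped with a closed-form lowest-set-bit computation instead of
--     a division-counting loop."""
--     def step(m):
--         v = 3 * m + 1
--         return v >> ((v & -v).bit_length() - 1)
--
--     def tail(cur, fuel):
--         if fuel <= 0:
--             return []
--         c = step(cur)
--         if c == 1:
--             return [1]
--         return [c] + tail(c, fuel - 1)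
--
--     return [n] + tail(n, max_steps)
-- ===== Notes on version B (the rewrite author's own statement) =====
-- stated objective: alternative
-- what changed: The division-counting while-loop v2 is replaced by a closed-form lowest-set-bit computation ((v & -v).bit_length() - 1), and the imperative orbit loop with append/break flags is replaced by a recursive tail construction; Pre_ excludes the inputs (max_steps > 0 with n even or non-positive) on which A's assert raises AssertionError.
import Mathlib
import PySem

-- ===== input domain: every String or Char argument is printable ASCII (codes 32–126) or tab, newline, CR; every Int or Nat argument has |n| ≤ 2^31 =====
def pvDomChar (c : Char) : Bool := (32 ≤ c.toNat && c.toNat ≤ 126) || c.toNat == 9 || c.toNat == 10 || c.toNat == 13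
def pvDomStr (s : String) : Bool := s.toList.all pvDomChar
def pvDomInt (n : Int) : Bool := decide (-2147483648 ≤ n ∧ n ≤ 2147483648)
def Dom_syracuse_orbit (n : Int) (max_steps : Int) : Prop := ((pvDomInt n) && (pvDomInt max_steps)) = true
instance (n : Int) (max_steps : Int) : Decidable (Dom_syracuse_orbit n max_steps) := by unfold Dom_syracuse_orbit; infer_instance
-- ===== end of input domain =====

-- B replaces A's division-counting 2-adic-valuation loop by a closed-form
-- lowest-set-bit computation and builds the orbit recursively instead of with
-- an imperative append/break loop (objective: alternative, same cost).


-- ===== PORT A =====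

-- v2's while-loop as recursion on n; the inner `n = 0` test is ONLY a
-- totality guard (Python's loop is entered with n ≠ 0 — v2 returns 999 for
-- n == 0 before the loop — and n // 2 ≠ 0 for even n ≠ 0, so it never fires).
def v2go (n : Int) (count : Int) : Int :=
  if _hm : PySem.Int.mod n 2 = 0 then
    if h0 : n = 0 then count
    else v2go (PySem.Int.floordiv n 2) (count + 1)
  else count
termination_by n.natAbs
decreasing_by
  have h2 : (2 : Int) ∣ n := (PySem.Int.mod_eq_zero_iff_dvd n 2).mp _hm
  obtain ⟨t, ht⟩ := h2
  have hfd : PySem.Int.floordiv n 2 = t := by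
    rw [PySem.Int.floordiv_eq_ediv_of_pos (by norm_num), ht]
    exact Int.mul_ediv_cancel_left t (by norm_num)
  rw [hfd]
  rw [ht] at h0 ⊢
  omega

def v2 (n : Int) : Int :=
  if n = 0 then 999 else v2go n 0

-- Python asserts `n % 2 == 1 and n > 0`; inputs reaching a failing assert
-- raise AssertionError and are excluded by Pre_.  The shift amount v2 val is
-- ≥ 0 here, so `.toNat` is exact.
def syracuse (n : Int) : Int :=
  let val := 3 * n + 1
  val >>> (v2 val).toNat

def orbitGo (fuel : Nat) (orbit : List Int) (current : Int) : List Int :=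
  match fuel with
  | 0 => orbit
  | f + 1 =>
    if current = 1 ∧ orbit.length > 1 then orbit
    else
      let c := syracuse current
      let orbit' := orbit ++ [c]
      if c = 1 then orbit' else orbitGo f orbit' c

def syracuse_orbit (n : Int) (max_steps : Int) : List Int :=
  orbitGo max_steps.toNat [n] n

-- ===== PORT B =====

-- Source B's step: v >> ((v & -v).bit_length() - 1); v = 3m+1 ≠ 0, so the Nat
-- subtraction `- 1` is exact (bit_length ≥ 1).
def sbStep (m : Int) : Int :=
  let v := 3 * m + 1
  v >>> (PySem.Int.bitLength (PySem.Int.band v (-v)) - 1)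

-- Source B's `tail(cur, fuel)`; `fuel <= 0` is the Nat-fuel base case.
def sbTail (cur : Int) (fuel : Nat) : List Int :=
  match fuel with
  | 0 => []
  | f + 1 =>
    let c := sbStep cur
    if c = 1 then [1] else c :: sbTail c f

def syracuse_orbit_alt (n : Int) (max_steps : Int) : List Int :=
  n :: sbTail n max_steps.toNat

-- ===== PRECONDITION & SPEC =====

-- Pre_ excludes exactly the inputs where A raises: with max_steps > 0 and n
-- even or non-positive, syracuse's assert fails with AssertionError.
def Pre_syracuse_orbit (n : Int) (max_steps : Int) : Prop :=
  max_steps ≤ 0 ∨ (0 < n ∧ PySem.Int.mod n 2 = 1)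
instance (n : Int) (max_steps : Int) : Decidable (Pre_syracuse_orbit n max_steps) := by
  unfold Pre_syracuse_orbit; infer_instance

def pvWitness_syracuse_orbit : Int × Int := (27, 100)

def Spec_syracuse_orbit (n : Int) (max_steps : Int) (out : List Int) : Prop := out = syracuse_orbit_alt n max_steps
instance (n : Int) (max_steps : Int) (out : List Int) : Decidable (Spec_syracuse_orbit n max_steps out) := by unfold Spec_syracuse_orbit; infer_instance

-- ===== CLAIM (what is proved, stated in full; the proofs are below) =====
def Claim_equal_syracuse_orbit : Prop := ∀ (n : Int) (max_steps : Int), Dom_syracuse_orbit n max_steps → Pre_syracuse_orbit n max_steps → Spec_syracuse_orbit n max_steps (syracuse_orbit n max_steps)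

-- ===== LEMMAS AND PROOFS =====

-- trailing-zero count of a Nat (proof-side helper only)
def tz (n : Nat) : Nat :=
  if h : n ≠ 0 ∧ n % 2 = 0 then tz (n / 2) + 1 else 0
termination_by n
decreasing_by omega

theorem tz_odd {n : Nat} (h : n % 2 = 1) : tz n = 0 := by
  rw [tz, dif_neg (by omega)]

theorem tz_even {n : Nat} (h0 : n ≠ 0) (h : n % 2 = 0) : tz n = tz (n / 2) + 1 := by
  rw [tz, dif_pos ⟨h0, h⟩]

-- 2^(tz n) divides n and the cofactor is odd
theorem tz_spec (n : Nat) (hn : 0 < n) :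
    n % 2 ^ tz n = 0 ∧ (n / 2 ^ tz n) % 2 = 1 := by
  induction n using Nat.strong_induction_on with
  | _ n ih =>
    rcases Nat.mod_two_eq_zero_or_one n with he | ho
    · have h0 : n ≠ 0 := by omega
      obtain ⟨m, hm⟩ : ∃ m, n = 2 * m := ⟨n / 2, by omega⟩
      have hmpos : 0 < m := by omega
      have := ih m (by omega) hmpos
      rw [tz_even h0 he]
      have hdiv : n / 2 = m := by omega
      rw [hdiv, pow_succ]
      constructor
      · subst hm
        rw [Nat.mul_comm (2 ^ tz m) 2, Nat.mul_mod_mul_left]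
        omega
      · subst hm
        rw [Nat.mul_comm (2 ^ tz m) 2, Nat.mul_div_mul_left _ _ (by omega)]
        exact this.2
    · rw [tz_odd ho]
      exact ⟨Nat.mod_one n, by simpa using ho⟩

theorem and_succ_double (m : Nat) : (2 * m + 1) &&& (2 * m) = 2 * m := by
  apply Nat.eq_of_testBit_eq
  intro i
  cases i with
  | zero =>
    rw [Nat.testBit_and, Nat.testBit_zero, Nat.testBit_zero]
    have : (2 * m) % 2 = 0 := by omega
    simp [this]
  | succ i =>
    rw [Nat.testBit_and]
    simp only [Nat.testBit_succ]
    have h1 : (2 * m + 1) / 2 = m := by omega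
    have h2 : (2 * m) / 2 = m := by omega
    rw [h1, h2, Bool.and_self]

theorem and_double_pred (m : Nat) (hm : 0 < m) :
    (2 * m) &&& (2 * m - 1) = 2 * (m &&& (m - 1)) := by
  apply Nat.eq_of_testBit_eq
  intro i
  cases i with
  | zero =>
    rw [Nat.testBit_and, Nat.testBit_zero, Nat.testBit_zero, Nat.testBit_zero]
    have h1 : (2 * m) % 2 = 0 := by omega
    have h2 : (2 * (m &&& (m - 1))) % 2 = 0 := by omega
    simp [h1, h2]
  | succ i =>
    rw [Nat.testBit_and]
    simp only [Nat.testBit_succ]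
    have h1 : (2 * m) / 2 = m := by omega
    have h2 : (2 * m - 1) / 2 = m - 1 := by omega
    have h3 : (2 * (m &&& (m - 1))) / 2 = m &&& (m - 1) := by omega
    rw [h1, h2, h3, Nat.testBit_and]

-- n - (n &&& (n-1)) is the lowest set bit, i.e. 2^(tz n)
theorem lowbit_eq (n : Nat) (hn : 0 < n) : n - (n &&& (n - 1)) = 2 ^ tz n := by
  induction n using Nat.strong_induction_on with
  | _ n ih =>
    rcases Nat.mod_two_eq_zero_or_one n with he | ho
    · obtain ⟨m, hm⟩ : ∃ m, n = 2 * m := ⟨n / 2, by omega⟩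
      have hmpos : 0 < m := by omega
      have hIH := ih m (by omega) hmpos
      rw [tz_even (by omega) he]
      have hdiv : n / 2 = m := by omega
      rw [hdiv, hm, and_double_pred m hmpos, pow_succ]
      have hle : m &&& (m - 1) ≤ m := Nat.and_le_left
      omega
    · obtain ⟨m, hm⟩ : ∃ m, n = 2 * m + 1 := ⟨n / 2, by omega⟩
      rw [tz_odd ho, hm]
      have : (2 * m + 1) - 1 = 2 * m := by omega
      rw [this, and_succ_double]
      omega

-- Python's v & -v for v > 0, via PySem.Int.band's two's-complement definition
theorem band_neg_self (v : Int) (hv : 0 < v) :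
    PySem.Int.band v (-v) = ((2 ^ tz v.toNat : Nat) : Int) := by
  have h1 : (0 : Int) ≤ v := le_of_lt hv
  have h2 : ¬ (0 : Int) ≤ -v := by omega
  rw [PySem.Int.band, if_pos h1, if_neg h2]
  have h3 : (-(-v) - 1).toNat = v.toNat - 1 := by omega
  rw [h3, lowbit_eq v.toNat (by omega)]

theorem bitLength_two_pow (k : Nat) :
    PySem.Int.bitLength ((2 ^ k : Nat) : Int) = k + 1 := by
  induction k with
  | zero => decide
  | succ k ih =>
    rw [PySem.Int.bitLength_natCast (Nat.two_pow_pos _)]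
    have : 2 ^ (k + 1) / 2 = 2 ^ k := by
      rw [pow_succ, Nat.mul_div_cancel _ (by norm_num)]
    rw [this, ih]

-- A's v2 loop counts exactly tz
theorem v2go_eq (m : Nat) : ∀ c : Int, 0 < m → v2go (m : Int) c = c + tz m := by
  induction m using Nat.strong_induction_on with
  | _ m ih =>
    intro c hm
    have hmod : PySem.Int.mod (m : Int) 2 = ((m % 2 : Nat) : Int) := by
      exact_mod_cast PySem.Int.mod_natCast m 2
    have hfd : PySem.Int.floordiv (m : Int) 2 = ((m / 2 : Nat) : Int) := by
      exact_mod_cast PySem.Int.floordiv_natCast m 2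
    rcases Nat.mod_two_eq_zero_or_one m with he | ho
    · rw [v2go, dif_pos (by rw [hmod, he]; rfl), dif_neg (Int.natCast_ne_zero.mpr (by omega)),
        hfd, ih (m / 2) (by omega) (c + 1) (by omega), tz_even (by omega) he]
      push_cast; ring
    · rw [v2go, dif_neg (by rw [hmod, ho]; simp), tz_odd ho]
      simp

-- the key step lemma: on odd positive m, A's syracuse equals B's step,
-- and the result is again odd and positive
theorem step_eq (m : Int) (hpos : 0 < m) (_hodd : PySem.Int.mod m 2 = 1) :
    syracuse m = sbStep m ∧ 0 < sbStep m ∧ PySem.Int.mod (sbStep m) 2 = 1 := by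
  set val : Int := 3 * m + 1 with hval
  have hvpos : 0 < val := by omega
  set N : Nat := val.toNat with hN
  have hNpos : 0 < N := by omega
  have hcast : val = (N : Int) := by omega
  set k : Nat := tz N with hk
  -- the two shift amounts agree
  have hv2 : v2 val = (k : Int) := by
    rw [v2, if_neg (by omega), hcast, v2go_eq N 0 hNpos]
    simp [hk]
  have hbl : PySem.Int.bitLength (PySem.Int.band val (-val)) - 1 = k := by
    rw [hcast, band_neg_self (N : Int) (by exact_mod_cast hNpos)]
    have : (N : Int).toNat = N := by omega
    rw [this, bitLength_two_pow]
    omega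
  have hshiftA : syracuse m = val >>> k := by
    rw [syracuse, ← hval, hv2]
    norm_num
  have hshiftB : sbStep m = val >>> k := by
    rw [sbStep, ← hval, hbl]
  -- the shifted value is the odd cofactor
  obtain ⟨hdvd, hoddq⟩ := tz_spec N hNpos
  have hq : val >>> k = ((N / 2 ^ k : Nat) : Int) := by
    rw [hcast]
    show ((N >>> k : Nat) : Int) = _
    rw [Nat.shiftRight_eq_div_pow]
  have hqpos : 0 < N / 2 ^ k := by
    rcases Nat.eq_zero_or_pos (N / 2 ^ k) with h | h
    · rw [h] at hoddq; simp at hoddq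
    · exact h
  refine ⟨by rw [hshiftA, hshiftB], ?_, ?_⟩
  · rw [hshiftB, hq]; exact_mod_cast hqpos
  · rw [hshiftB, hq]
    have : PySem.Int.mod ((N / 2 ^ k : Nat) : Int) 2 = (((N / 2 ^ k) % 2 : Nat) : Int) := by
      exact_mod_cast PySem.Int.mod_natCast (N / 2 ^ k) 2
    rw [this, hoddq]
    rfl

-- A's loop equals B's recursion once the loop is past its first entry
-- (re-entry always has current ≠ 1 because of the bottom break)
theorem orbitGo_eq (fuel : Nat) :
    ∀ (cur : Int), 0 < cur → PySem.Int.mod cur 2 = 1 → cur ≠ 1 →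
      ∀ orbit : List Int, orbitGo fuel orbit cur = orbit ++ sbTail cur fuel := by
  induction fuel with
  | zero => intro cur _ _ _ orbit; simp [orbitGo, sbTail]
  | succ f ih =>
    intro cur hpos hodd hne orbit
    obtain ⟨hstep, hpos', hodd'⟩ := step_eq cur hpos hodd
    rw [orbitGo, sbTail, if_neg (by simp [hne])]
    simp only [← hstep]
    by_cases h1 : syracuse cur = 1
    · rw [h1, if_pos rfl, if_pos rfl]
    · rw [if_neg h1, if_neg h1, ih (syracuse cur) (hstep ▸ hpos') (hstep ▸ hodd') h1]
      simp

theorem sbStep_one : sbStep 1 = 1 := by decide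

theorem syracuse_one : syracuse 1 = 1 := by
  have h := (step_eq 1 (by norm_num) (by decide)).1
  rw [h]; decide

-- ===== VERDICT (by name: the statement is the Claim_ definition above) =====
theorem syracuse_orbit_spec : Claim_equal_syracuse_orbit := by
  intro n max_steps _ hpre
  show syracuse_orbit n max_steps = syracuse_orbit_alt n max_steps
  rcases hpre with hle | ⟨hpos, hodd⟩
  · have h0 : max_steps.toNat = 0 := by omega
    rw [syracuse_orbit, syracuse_orbit_alt, h0]
    simp [orbitGo, sbTail]
  · rw [syracuse_orbit, syracuse_orbit_alt]
    by_cases h1 : n = 1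
    · subst h1
      cases hms : max_steps.toNat with
      | zero => simp [orbitGo, sbTail]
      | succ f =>
        rw [orbitGo, sbTail]
        simp [syracuse_one, sbStep_one]
    · rw [orbitGo_eq max_steps.toNat n hpos hodd h1 [n]]
      simp
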